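-- pv_equiv track=rewrite | github.com/cruzas/DD4ML | tests/analyze_hyperparam_results_resnet.py | calculate_resnet_params
-- ===== SOURCE A (Python) =====
-- from typing import Dict, List, Optional
--
-- def calculate_resnet_params(layers_config: List[int], base_width: int = 64) -> int:
--     """
--     Calculate approximate number of parameters for a ResNet model.
--
--     Args:
--         layers_config: List of number of blocks in each stage (e.g., [2, 2, 2, 2] for ResNet-18)
--         base_width: Base width (typically 64)
--
--     Returns:
--         Approximate number of parameters
--     """
--     # Initial conv: 3x3x3x64 (assuming 3 input channels)
--     params = 3 * base_width * 7 * 7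
--
--     # Each stage: stage1=64, stage2=128, stage3=256, stage4=512
--     widths = [base_width * (2 ** i) for i in range(len(layers_config))]
--
--     in_channels = base_width
--     for stage_idx, (num_blocks, out_channels) in enumerate(zip(layers_config, widths)):
--         for block_idx in range(num_blocks):
--             # Each BasicBlock has two 3x3 convolutions
--             # First conv in first block of each stage (except stage1) has stride=2
--             if block_idx == 0 and stage_idx > 0:
--                 # Downsample conv: 1x1 conv
--                 params += in_channels * out_channels
--
--             # Two 3x3 convs per block
--             params += in_channels * out_channels * 9
--             params += out_channels * out_channels * 9
--
--             in_channels = out_channels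
--
--     # Final FC layer: 512 * num_classes (assume 10)
--     params += widths[-1] * 10
--
--     return params
-- ===== SOURCE B (Python) =====
-- def calculate_resnet_params(layers_config, base_width=64):
--     """Closed-form per stage: first block explicit, remaining blocks as one multiple."""
--     params = 147 * base_width  # 3 * base_width * 7 * 7
--     in_ch = base_width
--     for i, n in enumerate(layers_config):
--         out = base_width * (2 ** i)
--         if n > 0:
--             first = (in_ch * out if i > 0 else 0) + 9 * in_ch * out + 9 * out * out
--             params += first + 18 * (n - 1) * out * out
--             in_ch = out
--     params += base_width * (2 ** (len(layers_config) - 1)) * 10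
--     return params
-- ===== Notes on version B (the rewrite author's own statement) =====
-- stated objective: faster
-- what changed: Replaces the per-block inner loop with a closed form per stage (first block explicit, remaining n-1 blocks as one arithmetic multiple of 18*out^2), so the cost is O(number of stages) instead of O(total blocks).
import Mathlib
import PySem

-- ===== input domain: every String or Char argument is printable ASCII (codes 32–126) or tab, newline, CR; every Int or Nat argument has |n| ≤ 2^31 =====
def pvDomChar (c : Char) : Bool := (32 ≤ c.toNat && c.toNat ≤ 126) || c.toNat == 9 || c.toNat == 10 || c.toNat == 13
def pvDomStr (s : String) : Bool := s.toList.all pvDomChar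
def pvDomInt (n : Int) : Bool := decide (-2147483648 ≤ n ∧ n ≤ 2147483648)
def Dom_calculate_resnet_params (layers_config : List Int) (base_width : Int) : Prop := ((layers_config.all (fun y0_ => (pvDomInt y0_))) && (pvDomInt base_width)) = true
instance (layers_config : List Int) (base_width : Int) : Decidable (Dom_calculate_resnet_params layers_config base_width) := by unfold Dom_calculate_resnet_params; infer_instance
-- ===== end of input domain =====

-- B replaces the per-block inner loop with a closed form per stage (asymptotically faster in total block count).


-- ===== PORT A =====
-- inner loop body of A: state is (params, in_channels)
def pvABlock (stage_idx : Int) (out_channels : Int) (s : Int × Int) (block_idx : Int) : Int × Int :=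
  let params := s.1
  let in_channels := s.2
  let params := if block_idx = 0 ∧ stage_idx > 0 then params + in_channels * out_channels else params
  let params := params + in_channels * out_channels * 9
  let params := params + out_channels * out_channels * 9
  (params, out_channels)

def calculate_resnet_params (layers_config : List Int) (base_width : Int) : Int :=
  let params : Int := 3 * base_width * 7 * 7
  let widths : List Int := (List.range layers_config.length).map (fun i => base_width * 2 ^ i)
  let st := (PySem.List.enumerate (layers_config.zip widths) 0).foldl
    (fun (s : Int × Int) p =>
      (PySem.List.pyRange 0 p.2.1 1).foldl (pvABlock p.1 p.2.2) s)
    (params, base_width)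
  st.1 + (PySem.List.pyGet? widths (-1)).getD 0 * 10

-- ===== PORT B =====
def pvBStage (base_width : Int) (s : Int × Int) (p : Int × Int) : Int × Int :=
  let i := p.1
  let n := p.2
  let out := base_width * 2 ^ i.toNat
  if n > 0 then
    let first := (if i > 0 then s.2 * out else 0) + 9 * s.2 * out + 9 * out * out
    (s.1 + first + 18 * (n - 1) * out * out, out)
  else s

def calculate_resnet_params_alt (layers_config : List Int) (base_width : Int) : Int :=
  let st := (PySem.List.enumerate layers_config 0).foldl (pvBStage base_width) (147 * base_width, base_width)
  st.1 + base_width * 2 ^ (layers_config.length - 1) * 10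

-- ===== PRECONDITION & SPEC =====
-- A raises IndexError reading the last width when layers_config is empty; Pre_ excludes exactly that.
def Pre_calculate_resnet_params (layers_config : List Int) (base_width : Int) : Prop := layers_config ≠ []
instance (layers_config : List Int) (base_width : Int) : Decidable (Pre_calculate_resnet_params layers_config base_width) := by unfold Pre_calculate_resnet_params; infer_instance
def pvWitness_calculate_resnet_params : List Int × Int := ([2, 2, 2, 2], 64)

def Spec_calculate_resnet_params (layers_config : List Int) (base_width : Int) (out : Int) : Prop := out = calculate_resnet_params_alt layers_config base_width
instance (layers_config : List Int) (base_width : Int) (out : Int) : Decidable (Spec_calculate_resnet_params layers_config base_width out) := by unfold Spec_calculate_resnet_params; infer_instance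

-- ===== CLAIM (what is proved, stated in full; the proofs are below) =====
def Claim_equal_calculate_resnet_params : Prop := ∀ (layers_config : List Int) (base_width : Int), Dom_calculate_resnet_params layers_config base_width → Pre_calculate_resnet_params layers_config base_width → Spec_calculate_resnet_params layers_config base_width (calculate_resnet_params layers_config base_width)

-- ===== LEMMAS AND PROOFS =====

-- tail of the inner loop: once in_channels = out_channels and block indices are positive,
-- each block adds 18*out^2
theorem pvABlock_tail (stage_idx out : Int) (a b : Int) (hab : 1 ≤ a) (p : Int) :
    (PySem.List.pyRange a b 1).foldl (pvABlock stage_idx out) (p, out)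
      = (p + 18 * out * out * max (b - a) 0, out) := by
  by_cases h : a < b
  · rw [PySem.List.pyRange_one_cons h, List.foldl_cons]
    have step : pvABlock stage_idx out (p, out) a = (p + 18 * out * out, out) := by
      simp only [pvABlock]
      rw [if_neg (by omega : ¬(a = 0 ∧ stage_idx > 0))]
      simp only [Prod.mk.injEq]
      exact ⟨by ring, by trivial⟩
    rw [step, pvABlock_tail stage_idx out (a + 1) b (by omega) _]
    simp only [Prod.mk.injEq]
    refine ⟨?_, by trivial⟩
    have hm : max (b - (a + 1)) 0 = max (b - a) 0 - 1 := by omega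
    rw [hm]; ring
  · rw [PySem.List.pyRange_one_eq_nil (by omega)]
    simp
    omega
termination_by (b - a).toNat
decreasing_by omega

-- whole inner loop of A for one stage, as B's closed form
theorem pvA_stage (stage_idx out n : Int) (p c : Int) :
    (PySem.List.pyRange 0 n 1).foldl (pvABlock stage_idx out) (p, c)
      = if n > 0 then
          (p + (if stage_idx > 0 then c * out else 0) + 9 * c * out + 9 * out * out
             + 18 * (n - 1) * out * out, out)
        else (p, c) := by
  by_cases h : n > 0
  · rw [PySem.List.pyRange_one_cons h, List.foldl_cons]
    have step : pvABlock stage_idx out (p, c) 0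
        = (p + (if stage_idx > 0 then c * out else 0) + 9 * c * out + 9 * out * out, out) := by
      simp only [pvABlock]
      by_cases hs : stage_idx > 0
      · rw [if_pos (by simp [hs]), if_pos hs]
        simp only [Prod.mk.injEq]
        exact ⟨by ring, by trivial⟩
      · rw [if_neg (by tauto), if_neg hs]
        simp only [Prod.mk.injEq]
        exact ⟨by ring, by trivial⟩
    rw [step, show (0:Int) + 1 = 1 from by norm_num,
        pvABlock_tail stage_idx out 1 n (le_refl 1)]
    rw [if_pos h]
    have hm : max (n - 1) 0 = n - 1 := by omega
    rw [hm]
    simp only [Prod.mk.injEq]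
    exact ⟨by ring, by trivial⟩
  · rw [PySem.List.pyRange_one_eq_nil (by omega)]
    simp [h]

-- the enumerate-zip fold of A equals the enumerate fold of B, for any start index s
theorem pvFold_eq (base_width : Int) (l : List Int) (s : Nat) (p c : Int) :
    (PySem.List.enumerate (l.zip ((List.range l.length).map
        (fun i => base_width * 2 ^ (s + i)))) (s : Int)).foldl
      (fun (st : Int × Int) q => (PySem.List.pyRange 0 q.2.1 1).foldl (pvABlock q.1 q.2.2) st) (p, c)
      = (PySem.List.enumerate l (s : Int)).foldl (pvBStage base_width) (p, c) := by
  induction l generalizing s p c with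
  | nil => simp [PySem.List.enumerate_nil]
  | cons x xs ih =>
    rw [List.length_cons, List.range_succ_eq_map]
    simp only [List.map_cons, List.map_map, List.zip_cons_cons,
      PySem.List.enumerate_cons, List.foldl_cons]
    rw [pvA_stage]
    have hout : base_width * 2 ^ (s + 0) = base_width * 2 ^ ((s : Int)).toNat := by
      simp
    have hstep : (if (0:Int) < x then
          (p + (if (0:Int) < (s:Int) then c * (base_width * 2 ^ (s + 0)) else 0)
            + 9 * c * (base_width * 2 ^ (s + 0)) + 9 * (base_width * 2 ^ (s + 0)) * (base_width * 2 ^ (s + 0))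
            + 18 * (x - 1) * (base_width * 2 ^ (s + 0)) * (base_width * 2 ^ (s + 0)),
           base_width * 2 ^ (s + 0))
        else (p, c)) = pvBStage base_width (p, c) ((s : Int), x) := by
      simp only [pvBStage, hout]
      by_cases hx : (0:Int) < x
      · simp only [if_pos hx, gt_iff_lt, Prod.mk.injEq]
        exact ⟨by ring, by trivial⟩
      · simp [hx]
    rw [show ((fun i => base_width * 2 ^ (s + i)) ∘ Nat.succ) = (fun i => base_width * 2 ^ ((s+1) + i)) from by
      funext i; show base_width * 2 ^ (s + (i+1)) = base_width * 2 ^ ((s+1)+i); rw [show s + (i+1) = (s+1)+i from by omega]]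
    
    rw [hstep]
    have := ih (s + 1) (pvBStage base_width (p, c) ((s : Int), x)).1 (pvBStage base_width (p, c) ((s : Int), x)).2
    push_cast at this ⊢
    rw [← this]

theorem calculate_resnet_params_spec : Claim_equal_calculate_resnet_params := by
  intro l bw _ hpre
  unfold Spec_calculate_resnet_params calculate_resnet_params calculate_resnet_params_alt
  dsimp only
  have hlen : l.length = (l.length - 1) + 1 := by
    cases l with
    | nil => exact absurd rfl hpre
    | cons y ys => simp
  have hwid : (List.range l.length).map (fun i => bw * 2 ^ i)
      = (List.range (l.length - 1)).map (fun i => bw * 2 ^ i) ++ [bw * 2 ^ (l.length - 1)] := by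
    conv_lhs => rw [hlen]
    rw [List.range_succ, List.map_append, List.map_singleton]
  have hre : (fun i => bw * 2 ^ i) = (fun i : ℕ => bw * 2 ^ (0 + i)) := by
    funext i; rw [Nat.zero_add]
  have hfold := pvFold_eq bw l 0 (3 * bw * 7 * 7) bw
  simp only [Nat.cast_zero] at hfold
  rw [hre] at hwid
  rw [hre, hfold, hwid, PySem.List.pyGet?_neg_one_append_singleton]
  simp only [Option.getD_some]
  have h147 : (3 : Int) * bw * 7 * 7 = 147 * bw := by ring
  rw [h147]
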